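-- pv_equiv track=rewrite | github.com/anatoli-derese/Competitive-Programming | a2sv/calculate-money-in-leetcode-bank.py | totalMoney
-- ===== SOURCE A (Python) =====
-- def totalMoney(n: int) -> int:
--     weeks = n // 7 # get the numbers of mondays
--     remDays = n % 7 # get the numbers of days that don't fufill a week
--     days = 0
--     for i in range(weeks):
--         days += sum(range(i+1, i+7+1))
--     x = sum(range(weeks+1,weeks+remDays+1))
--     days += sum(range(weeks+1, weeks + 1 + remDays))
--     return days
-- ===== SOURCE B (Python) =====
-- def totalMoney(n: int) -> int:
--     # closed form: full weeks are an arithmetic series, plus the partial week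
--     weeks, rem = divmod(n, 7)
--     return 28 * weeks + 7 * weeks * (weeks - 1) // 2 + rem * weeks + rem * (rem + 1) // 2
-- ===== Notes on version B (the rewrite author's own statement) =====
-- stated objective: faster
-- what changed: Replaces the per-week loop with its nested range-sums by a closed-form arithmetic-series formula for the full weeks plus the partial week. Pre_ excludes negative day counts (outside the problem's natural domain), where A's skipped loop yields an accidental partial-week-only sum that the closed form does not reproduce.
-- outside the precondition, e.g. on totalMoney(-3): A returns 6, B returns -15
import Mathlib
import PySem

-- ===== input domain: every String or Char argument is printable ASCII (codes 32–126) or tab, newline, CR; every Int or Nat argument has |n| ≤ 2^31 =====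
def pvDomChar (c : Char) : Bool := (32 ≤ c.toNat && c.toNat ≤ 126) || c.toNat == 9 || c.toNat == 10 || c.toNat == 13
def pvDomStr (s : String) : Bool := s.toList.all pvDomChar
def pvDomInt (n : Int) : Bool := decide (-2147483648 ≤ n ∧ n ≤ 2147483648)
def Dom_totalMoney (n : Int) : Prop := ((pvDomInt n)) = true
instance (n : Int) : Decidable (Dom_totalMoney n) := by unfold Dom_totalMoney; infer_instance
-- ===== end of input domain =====

-- B replaces A's per-week loop of range-sums by a closed-form arithmetic-series formula (O(1) instead of O(n)).

-- ===== PORT A =====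
def totalMoney (n : Int) : Int :=
  let weeks := PySem.Int.floordiv n 7
  let remDays := PySem.Int.mod n 7
  let days : Int := 0
  let days := (PySem.List.pyRange 0 weeks 1).foldl
    (fun d i => d + (PySem.List.pyRange (i + 1) (i + 7 + 1) 1).foldl (· + ·) 0) days
  let _x := (PySem.List.pyRange (weeks + 1) (weeks + remDays + 1) 1).foldl (· + ·) 0
  let days := days + (PySem.List.pyRange (weeks + 1) (weeks + 1 + remDays) 1).foldl (· + ·) 0
  days

-- ===== PORT B =====
def totalMoney_alt (n : Int) : Int :=
  let weeks := PySem.Int.floordiv n 7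
  let rem := PySem.Int.mod n 7
  28 * weeks + PySem.Int.floordiv (7 * weeks * (weeks - 1)) 2
    + rem * weeks + PySem.Int.floordiv (rem * (rem + 1)) 2

-- ===== PRECONDITION & SPEC =====
-- Pre_ excludes negative day counts (outside the problem's natural domain): there A's for-loop is
-- skipped and it returns an accidental partial-week-only sum that the closed form does not reproduce.
def Pre_totalMoney (n : Int) : Prop := 0 ≤ n
instance (n : Int) : Decidable (Pre_totalMoney n) := by unfold Pre_totalMoney; infer_instance
def pvWitness_totalMoney : Int := (20)

def Spec_totalMoney (n : Int) (out : Int) : Prop := out = totalMoney_alt n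
instance (n : Int) (out : Int) : Decidable (Spec_totalMoney n out) := by unfold Spec_totalMoney; infer_instance

-- ===== CLAIM (what is proved, stated in full; the proofs are below) =====
def Claim_equal_totalMoney : Prop := ∀ (n : Int), Dom_totalMoney n → Pre_totalMoney n → Spec_totalMoney n (totalMoney n)

-- ===== LEMMAS AND PROOFS =====

-- sum of a length-k range starting at a, doubled (avoids Int division)
theorem pv_sum_range (a : Int) (k : Nat) :
    2 * ((PySem.List.pyRange a (a + (k : Int)) 1).foldl (· + ·) 0) = 2 * (k : Int) * a + (k : Int) * ((k : Int) - 1) := by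
  induction k with
  | zero => simp [PySem.List.pyRange_one_eq_nil]
  | succ k ih =>
    rw [show a + ((k + 1 : Nat) : Int) = (a + (k : Int)) + 1 by push_cast; ring,
        PySem.List.pyRange_one_succ_right (by omega), List.foldl_append]
    push_cast
    simp only [List.foldl]
    linear_combination ih

-- A's loop over the full weeks, doubled
theorem pv_loop (w : Nat) :
    2 * ((PySem.List.pyRange 0 (w : Int) 1).foldl
      (fun d i => d + (PySem.List.pyRange (i + 1) (i + 7 + 1) 1).foldl (· + ·) 0) 0)
    = 56 * (w : Int) + 7 * (w : Int) * ((w : Int) - 1) := by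
  induction w with
  | zero => simp [PySem.List.pyRange_one_eq_nil]
  | succ w ih =>
    rw [show ((w + 1 : Nat) : Int) = (w : Int) + 1 by push_cast; ring,
        PySem.List.pyRange_one_succ_right (by positivity), List.foldl_append]
    simp only [List.foldl]
    have hin := pv_sum_range ((w : Int) + 1) 7
    rw [show ((w : Int) + 1) + ((7 : Nat) : Int) = (w : Int) + 7 + 1 by push_cast; ring] at hin
    linear_combination ih + hin

-- ===== VERDICT (by name: the statement is the Claim_ definition above) =====
theorem totalMoney_spec : Claim_equal_totalMoney := by
  intro n _ hpre
  unfold Pre_totalMoney at hpre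
  unfold Spec_totalMoney totalMoney totalMoney_alt
  set w := PySem.Int.floordiv n 7 with hwdef
  set r := PySem.Int.mod n 7 with hrdef
  have hw0 : 0 ≤ w := by
    rw [hwdef, PySem.Int.floordiv_eq_ediv_of_pos (by norm_num)]
    exact Int.ediv_nonneg hpre (by norm_num)
  have hr0 : 0 ≤ r := PySem.Int.mod_nonneg _ (by norm_num)
  obtain ⟨W, hW⟩ : ∃ W : Nat, w = (W : Int) := ⟨w.toNat, (Int.toNat_of_nonneg hw0).symm⟩
  obtain ⟨R, hR⟩ : ∃ R : Nat, r = (R : Int) := ⟨r.toNat, (Int.toNat_of_nonneg hr0).symm⟩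
  obtain ⟨c, hc⟩ := Int.even_mul_succ_self (w - 1)
  obtain ⟨d, hd⟩ := Int.even_mul_succ_self r
  have hdiv1 : PySem.Int.floordiv (7 * w * (w - 1)) 2 = 7 * c := by
    rw [show 7 * w * (w - 1) = 2 * (7 * c) by linear_combination 7 * hc,
        PySem.Int.floordiv_eq_ediv_of_pos (by norm_num), Int.mul_ediv_cancel_left _ (by norm_num)]
  have hdiv2 : PySem.Int.floordiv (r * (r + 1)) 2 = d := by
    rw [show r * (r + 1) = 2 * d by linear_combination hd,
        PySem.Int.floordiv_eq_ediv_of_pos (by norm_num), Int.mul_ediv_cancel_left _ (by norm_num)]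
  have hloop := pv_loop W
  have hpart := pv_sum_range (w + 1) R
  rw [← hW] at hloop
  rw [← hR] at hpart
  rw [show (w + 1) + r = w + r + 1 by ring] at hpart
  simp only [hdiv1, hdiv2]
  rw [show w + 1 + r = w + r + 1 by ring]
  set L := (PySem.List.pyRange 0 w 1).foldl
    (fun d i => d + (PySem.List.pyRange (i + 1) (i + 7 + 1) 1).foldl (· + ·) 0) 0 with hL
  set P := (PySem.List.pyRange (w + 1) (w + r + 1) 1).foldl (· + ·) 0 with hP
  have hloop' : 2 * L = 56 * w + 14 * c := by linear_combination hloop + 7 * hc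
  have hpart' : 2 * P = 2 * (r * w) + 2 * d := by linear_combination hpart + hd
  linarith [hloop', hpart']
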